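-- pv_equiv track=rewrite | github.com/JakubBilski/mini-fcm | src/transformingData/derivatives.py | transform
-- ===== SOURCE A (Python) =====
-- import copy
--
-- def transform(xses_series, max_order):
--     transformed_xses_series = []
--     input_size = len(xses_series[0][0])
--     for xs in xses_series:
--         transformed_xs = copy.deepcopy(xs)
--         derivatives = xs
--         for order in range(1, max_order+1):
--             derivatives = [[
--                 derivatives[i][j]-derivatives[i+1][j]
--                 for j in range(input_size)]
--                 for i in range(len(derivatives)-1)]
--             for i in range(len(derivatives)):
--                 transformed_xs[i+order].extend(derivatives[i])
--         transformed_xses_series.append(transformed_xs[max_order:])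
--
--     return transformed_xses_series
-- ===== SOURCE B (Python) =====
-- def transform(xses_series, max_order):
--     # Row-by-row: each output row is built from a sliding window of the series
--     # via a triangular finite-difference table, instead of A's global per-order
--     # derivative arrays mutated into a deep copy.
--     input_size = len(xses_series[0][0])
--     out = []
--     for xs in xses_series:
--         rows = []
--         for t in range(len(xs)):
--             row = list(xs[t])
--             if max_order >= 1 and t >= max_order:
--                 level = [r[:input_size] for r in xs[t - max_order:t + 1]]
--                 for _k in range(1, max_order + 1):
--                     level = [[level[i][j] - level[i + 1][j]
--                               for j in range(input_size)]
--                              for i in range(len(level) - 1)]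
--                     row.extend(level[-1])
--             rows.append(row)
--         out.append(rows[max_order:])
--     return out
-- ===== Notes on version B (the rewrite author's own statement) =====
-- stated objective: alternative
-- what changed: Instead of A's global per-order derivative arrays mutated into a deep copy and sliced at the end, B builds each surviving output row independently from a sliding window of max_order+1 input rows, collapsing a triangular finite-difference table and appending its last row at each level.
import Mathlib
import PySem

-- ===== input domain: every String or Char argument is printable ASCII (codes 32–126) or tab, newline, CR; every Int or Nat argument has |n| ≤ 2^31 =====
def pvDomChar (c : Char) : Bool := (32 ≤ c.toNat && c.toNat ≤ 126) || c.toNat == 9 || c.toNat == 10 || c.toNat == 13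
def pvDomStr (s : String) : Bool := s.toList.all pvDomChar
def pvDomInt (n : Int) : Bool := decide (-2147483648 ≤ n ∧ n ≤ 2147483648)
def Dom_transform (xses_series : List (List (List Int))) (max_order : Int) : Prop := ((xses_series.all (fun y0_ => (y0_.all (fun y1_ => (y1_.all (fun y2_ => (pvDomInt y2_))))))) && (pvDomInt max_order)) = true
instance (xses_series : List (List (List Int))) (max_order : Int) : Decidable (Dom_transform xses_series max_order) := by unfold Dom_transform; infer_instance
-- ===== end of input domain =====

-- B rebuilds each surviving output row independently from a sliding window of max_order+1 input
-- rows via a triangular finite-difference table (same subtraction recurrence, different pass shape);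
-- A mutates rows of a deep copy in place, but its RETURN value is all this file claims about.

-- ===== PORT A =====
-- derivatives = [[derivatives[i][j]-derivatives[i+1][j] for j in range(input_size)] for i in range(len(derivatives)-1)]
def pvDerivStep (s : Nat) (d : List (List Int)) : List (List Int) :=
  (List.range (d.length - 1)).map (fun i =>
    (List.range s).map (fun j => (d.getD i []).getD j 0 - (d.getD (i+1) []).getD j 0))

-- for i in range(len(derivatives)): transformed_xs[i+order].extend(derivatives[i])
-- (order comes from range(1, max_order+1), hence ≥ 1, so order.toNat is exact)
def pvExtendLoop (order : Int) (d : List (List Int)) (txs : List (List Int)) : List (List Int) :=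
  (List.range d.length).foldl
    (fun t i => t.set (i + order.toNat) ((t.getD (i + order.toNat) []) ++ d.getD i [])) txs

-- one series: deepcopy (identity on immutable data), the order loop, then transformed_xs[max_order:]
def pvSeriesA (input_size : Nat) (max_order : Int) (xs : List (List Int)) : List (List Int) :=
  let st := (PySem.List.pyRange 1 (max_order+1) 1).foldl
    (fun (st : List (List Int) × List (List Int)) order =>
      let d := pvDerivStep input_size st.2
      (pvExtendLoop order d st.1, d))
    (xs, xs)
  PySem.List.slice st.1 (some max_order) none

def transform (xses_series : List (List (List Int))) (max_order : Int) : List (List (List Int)) :=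
  -- input_size = len(xses_series[0][0]); Python raises IndexError when empty — excluded by Pre_
  let input_size := ((xses_series.headD []).headD []).length
  xses_series.foldl (fun acc xs => acc ++ [pvSeriesA input_size max_order xs]) []

-- ===== PORT B =====
-- level = [[level[i][j] - level[i+1][j] for j in range(input_size)] for i in range(len(level)-1)]
def pvLevelStep (s : Nat) (lvl : List (List Int)) : List (List Int) :=
  (List.range (lvl.length - 1)).map (fun i =>
    (List.range s).map (fun j => (lvl.getD i []).getD j 0 - (lvl.getD (i+1) []).getD j 0))

-- one output row: copy of xs[t], plus the diagonal of the window's difference table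
def pvRowB (s : Nat) (max_order : Int) (xs : List (List Int)) (t : Nat) : List Int :=
  let row := xs.getD t []
  if 1 ≤ max_order ∧ max_order ≤ (t : Int) then
    -- level = [r[:input_size] for r in xs[t-max_order:t+1]]
    let w0 := (PySem.List.slice xs (some ((t : Int) - max_order)) (some ((t : Int) + 1))).map
                (fun r => PySem.List.slice r none (some (s : Int)))
    ((PySem.List.pyRange 1 (max_order + 1) 1).foldl
      (fun (st : List Int × List (List Int)) _k =>
        let lvl := pvLevelStep s st.2
        -- row.extend(level[-1]); level is nonempty here, so level[-1] is its last entry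
        (st.1 ++ lvl.getD (lvl.length - 1) [], lvl))
      (row, w0)).1
  else row

def transform_alt (xses_series : List (List (List Int))) (max_order : Int) : List (List (List Int)) :=
  let input_size := ((xses_series.headD []).headD []).length
  xses_series.map (fun xs =>
    PySem.List.slice ((List.range xs.length).map (pvRowB input_size max_order xs))
      (some max_order) none)

-- ===== PRECONDITION & SPEC =====
-- Pre_ excludes exactly the inputs where Python A raises IndexError: an empty series list or empty
-- first series (input_size line), or — when differencing actually runs, i.e. max_order ≥ 1 and a
-- series has ≥ 2 rows — a row shorter than input_size.
def Pre_transform (xses_series : List (List (List Int))) (max_order : Int) : Prop :=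
  xses_series ≠ [] ∧ (xses_series.headD []) ≠ [] ∧
  (1 ≤ max_order → ∀ xs ∈ xses_series, 2 ≤ xs.length →
    ∀ row ∈ xs, ((xses_series.headD []).headD []).length ≤ row.length)
instance (xses_series : List (List (List Int))) (max_order : Int) : Decidable (Pre_transform xses_series max_order) := by unfold Pre_transform; infer_instance

def pvWitness_transform : List (List (List Int)) × Int := ([[[1], [2], [3]]], 1)

def Spec_transform (xses_series : List (List (List Int))) (max_order : Int) (out : List (List (List Int))) : Prop := out = transform_alt xses_series max_order
instance (xses_series : List (List (List Int))) (max_order : Int) (out : List (List (List Int))) : Decidable (Spec_transform xses_series max_order out) := by unfold Spec_transform; infer_instance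

-- ===== CLAIM (what is proved, stated in full; the proofs are below) =====
def Claim_equal_transform : Prop := ∀ (xses_series : List (List (List Int))) (max_order : Int), Dom_transform xses_series max_order → Pre_transform xses_series max_order → Spec_transform xses_series max_order (transform xses_series max_order)

-- ===== LEMMAS AND PROOFS =====

-- generic list helpers -------------------------------------------------------

theorem getD_map_range {α : Type} (f : Nat → α) (n i : Nat) (d : α) (h : i < n) :
    ((List.range n).map f).getD i d = f i := by
  simp [List.getD_eq_getElem?_getD, h]

theorem getD_take_lt (l : List Int) (s j : Nat) (h : j < s) (d : Int) :
    (l.take s).getD j d = l.getD j d := by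
  simp [List.getD_eq_getElem?_getD, h]

theorem map_getD_range_self {α : Type} (l : List α) (d : α) :
    (List.range l.length).map (fun t => l.getD t d) = l := by
  apply List.ext_getElem
  · simp
  · intro i h1 h2; simp [List.getD_eq_getElem?_getD, List.getElem?_eq_getElem h2]

theorem drop_map_range {α : Type} (n m : Nat) (f : Nat → α) :
    ((List.range n).map f).drop m = (List.range (n-m)).map (fun i => f (m+i)) := by
  apply List.ext_getElem
  · simp
  · intro i h1 h2; simp

theorem set_map_range {α : Type} (n j : Nat) (f : Nat → α) (v : α) :
    (((List.range n).map f).set j v) = (List.range n).map (fun t => if t = j then v else f t) := by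
  apply List.ext_getElem
  · simp
  · intro i h1 h2
    by_cases hij : i = j <;> simp [hij, Ne.symm]

theorem flatten_map_range_succ {α : Type} (f : Nat → List α) (r : Nat) :
    ((List.range (r+1)).map f).flatten = f 0 ++ ((List.range r).map (fun k => f (k+1))).flatten := by
  rw [List.range_succ_eq_map]
  simp [List.map_map, Function.comp_def]

-- the column-wise difference of two rows -------------------------------------

def pvCD (s : Nat) (a b : List Int) : List Int :=
  (List.range s).map (fun j => a.getD j 0 - b.getD j 0)

theorem pvCD_take (s : Nat) (a b : List Int) :
    pvCD s (a.take s) (b.take s) = pvCD s a b := by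
  unfold pvCD
  exact List.map_congr_left (fun j hj => by
    rw [getD_take_lt _ _ _ (List.mem_range.mp hj), getD_take_lt _ _ _ (List.mem_range.mp hj)])

theorem derivStep_eq (s : Nat) (d : List (List Int)) :
    pvDerivStep s d = (List.range (d.length - 1)).map
      (fun i => pvCD s (d.getD i []) (d.getD (i+1) [])) := rfl

theorem levelStep_eq_derivStep : @pvLevelStep = @pvDerivStep := rfl

theorem length_derivStep (s : Nat) (d : List (List Int)) :
    (pvDerivStep s d).length = d.length - 1 := by simp [pvDerivStep]

theorem getD_derivStep (s : Nat) (d : List (List Int)) (i : Nat) (h : i + 1 < d.length) :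
    (pvDerivStep s d).getD i [] = pvCD s (d.getD i []) (d.getD (i+1) []) := by
  rw [derivStep_eq]; exact getD_map_range _ _ _ _ (by omega)

-- iterated derivative and windows --------------------------------------------

def pvIter (s : Nat) (k : Nat) (d : List (List Int)) : List (List Int) :=
  (pvDerivStep s)^[k] d

theorem pvIter_comm (s k : Nat) (d : List (List Int)) :
    pvIter s k (pvDerivStep s d) = pvIter s (k+1) d := by
  simp only [pvIter]
  rw [Function.iterate_succ_apply]

theorem length_pvIter (s k : Nat) (d : List (List Int)) :
    (pvIter s k d).length = d.length - k := by
  induction k generalizing d with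
  | zero => simp [pvIter]
  | succ k ih =>
      rw [pvIter, Function.iterate_succ_apply, ← pvIter, ih, length_derivStep]
      omega

def pvWin (a m : Nat) (d : List (List Int)) : List (List Int) :=
  (List.range m).map (fun i => d.getD (a+i) [])

theorem length_pvWin (a m : Nat) (d : List (List Int)) : (pvWin a m d).length = m := by
  simp [pvWin]

theorem getD_pvWin (a m i : Nat) (d : List (List Int)) (h : i < m) :
    (pvWin a m d).getD i [] = d.getD (a+i) [] := getD_map_range _ _ _ _ h

theorem derivStep_pvWin (s a m : Nat) (d : List (List Int)) (h : a + m ≤ d.length) :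
    pvDerivStep s (pvWin a m d) = pvWin a (m-1) (pvDerivStep s d) := by
  rw [derivStep_eq, length_pvWin]
  show _ = (List.range (m-1)).map (fun i => (pvDerivStep s d).getD (a+i) [])
  refine List.map_congr_left (fun i hi => ?_)
  have hi' : i < m - 1 := List.mem_range.mp hi
  rw [getD_pvWin _ _ _ _ (by omega), getD_pvWin _ _ _ _ (by omega),
      getD_derivStep _ _ _ (by omega)]
  have : a + (i+1) = (a+i) + 1 := by omega
  rw [this]

-- the first B step on the column-truncated window equals the untruncated one --

theorem derivStep_winT (s a m : Nat) (xs : List (List Int)) (h : a + m + 1 ≤ xs.length) :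
    pvDerivStep s ((List.range (m+1)).map (fun i => (xs.getD (a+i) []).take s)) =
      pvWin a m (pvDerivStep s xs) := by
  rw [derivStep_eq]
  simp only [List.length_map, List.length_range, Nat.add_sub_cancel]
  show _ = (List.range m).map (fun i => (pvDerivStep s xs).getD (a+i) [])
  refine List.map_congr_left (fun i hi => ?_)
  have hi' : i < m := List.mem_range.mp hi
  rw [getD_map_range _ _ _ _ (by omega), getD_map_range _ _ _ _ (by omega), pvCD_take,
      getD_derivStep _ _ _ (by omega)]
  have : a + (i+1) = (a+i) + 1 := by omega
  rw [this]

-- B's inner fold, characterised ----------------------------------------------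

def pvPieces (s : Nat) : Nat → List (List Int) → List Int
  | 0, _ => []
  | r+1, lvl =>
      ((pvLevelStep s lvl).getD ((pvLevelStep s lvl).length - 1) []) ++
        pvPieces s r (pvLevelStep s lvl)

theorem foldB_eq_pieces (s : Nat) (ks : List Int) (row : List Int)
    (lvl : List (List Int)) :
    ((ks.foldl (fun (st : List Int × List (List Int)) _k =>
        let lvl := pvLevelStep s st.2
        (st.1 ++ lvl.getD (lvl.length - 1) [], lvl)) (row, lvl))).1 =
      row ++ pvPieces s ks.length lvl := by
  induction ks generalizing row lvl with
  | nil => simp [pvPieces]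
  | cons k ks ih =>
      refine (ih _ _).trans ?_
      simp [pvPieces, List.append_assoc]

theorem pieces_pvWin (s : Nat) (r a : Nat) (d : List (List Int)) (h : a + r < d.length) :
    pvPieces s r (pvWin a (r+1) d) =
      ((List.range r).map (fun k0 => (pvIter s (k0+1) d).getD (a + r - (k0+1)) [])).flatten := by
  induction r generalizing a d with
  | zero => simp [pvPieces]
  | succ r ih =>
      show ((pvLevelStep s (pvWin a (r+1+1) d)).getD ((pvLevelStep s (pvWin a (r+1+1) d)).length - 1) []) ++
            pvPieces s r (pvLevelStep s (pvWin a (r+1+1) d)) = _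
      rw [levelStep_eq_derivStep]
      rw [derivStep_pvWin s a (r+1+1) d (by omega)]
      simp only [Nat.add_sub_cancel]
      rw [length_pvWin, Nat.add_sub_cancel, getD_pvWin _ _ _ _ (by omega)]
      rw [ih a (pvDerivStep s d) (by rw [length_derivStep]; omega)]
      rw [flatten_map_range_succ]
      have hhead : ((pvDerivStep s d).getD (a+r) [] : List Int) =
          (pvIter s (0+1) d).getD (a + (r+1) - (0+1)) [] := by
        simp [pvIter]
      have htail :
          ((List.range r).map (fun k0 => (pvIter s (k0+1) (pvDerivStep s d)).getD (a + r - (k0+1)) [])).flatten =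
          ((List.range r).map (fun k0 => (pvIter s (k0+1+1) d).getD (a + (r+1) - (k0+1+1)) [])).flatten := by
        refine congrArg _ (List.map_congr_left (fun k0 _ => ?_))
        rw [pvIter_comm]
        have : a + r - (k0+1) = a + (r+1) - (k0+1+1) := by omega
        rw [this]
      exact congrArg₂ (· ++ ·) hhead htail

-- A's extend loop, characterised ---------------------------------------------

theorem extendLoop_aux (k : Nat) (d : List (List Int)) (n : Nat) (g : Nat → List Int)
    (q : Nat) (hqn : q + k ≤ n) :
    (List.range q).foldl
        (fun t i => t.set (i + k) ((t.getD (i + k) []) ++ d.getD i [])) ((List.range n).map g) =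
      (List.range n).map (fun t => g t ++ if k ≤ t ∧ t - k < q then d.getD (t-k) [] else []) := by
  induction q with
  | zero => simp
  | succ q ih =>
      rw [List.range_succ, List.foldl_append, ih (by omega)]
      
      simp only [List.foldl_cons, List.foldl_nil]
      rw [getD_map_range _ _ _ _ (by omega), set_map_range]
      refine List.map_congr_left (fun t ht => ?_)
      have ht' : t < n := List.mem_range.mp ht
      by_cases h1 : t = q + k
      · rw [if_pos h1, if_pos (show k ≤ t ∧ t - k < q + 1 by omega)]
        have hnot : ¬(k ≤ q + k ∧ q + k - k < q) := by omega
        rw [h1, if_neg hnot]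
        have : q + k - k = q := by omega
        rw [this]
        simp
      · rw [if_neg h1]
        by_cases h2 : k ≤ t ∧ t - k < q
        · rw [if_pos h2, if_pos (show k ≤ t ∧ t - k < q + 1 by omega)]
        · rw [if_neg h2, if_neg (show ¬(k ≤ t ∧ t - k < q + 1) by omega)]

theorem extendLoop_eq (o : Int) (d : List (List Int)) (n : Nat) (g : Nat → List Int)
    (hn : d.length = 0 ∨ d.length + o.toNat ≤ n) :
    pvExtendLoop o d ((List.range n).map g) =
      (List.range n).map (fun t =>
        g t ++ if o.toNat ≤ t ∧ t - o.toNat < d.length then d.getD (t - o.toNat) [] else []) := by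
  unfold pvExtendLoop
  rcases hn with h0 | hn
  · rw [h0]
    simp [h0]
  · exact extendLoop_aux o.toNat d n g d.length (by omega)

-- A's order fold, characterised ----------------------------------------------

def pvJoin (s : Nat) (xs : List (List Int)) (K t : Nat) : List Int :=
  ((List.range K).map
    (fun k0 => if k0 + 1 ≤ t then (pvIter s (k0+1) xs).getD (t-(k0+1)) [] else [])).flatten

theorem foldA_inv (s : Nat) (xs : List (List Int)) (K : Nat) :
    (((List.range K).map (fun k : Nat => (1:Int) + k)).foldl
        (fun (st : List (List Int) × List (List Int)) order =>
          let d := pvDerivStep s st.2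
          (pvExtendLoop order d st.1, d)) (xs, xs)) =
      ((List.range xs.length).map (fun t => xs.getD t [] ++ pvJoin s xs K t), pvIter s K xs) := by
  induction K with
  | zero =>
      simp only [List.range_zero, List.map_nil, List.foldl_nil, pvJoin, List.flatten_nil,
        List.append_nil, pvIter, Function.iterate_zero, id]
      rw [map_getD_range_self]
  | succ K ih =>
      rw [List.range_succ, List.map_append, List.foldl_append, ih]
      simp only [List.map_cons, List.map_nil, List.foldl_cons, List.foldl_nil]
      have hiter : pvDerivStep s (pvIter s K xs) = pvIter s (K+1) xs := by
        simp only [pvIter]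
        rw [Function.iterate_succ_apply']
      have htoNat : ((1:Int) + (K:Int)).toNat = K + 1 := by omega
      rw [Prod.mk.injEq]
      refine ⟨?_, hiter⟩
      rw [hiter]
      have hlen : (pvIter s (K+1) xs).length = xs.length - (K+1) := length_pvIter ..
      rw [extendLoop_eq _ _ _ _ (by
        rcases Nat.le_total (K+1) xs.length with h | h
        · right; rw [hlen]; omega
        · left; rw [hlen]; omega)]
      refine List.map_congr_left (fun t ht => ?_)
      have ht' : t < xs.length := List.mem_range.mp ht
      rw [List.append_assoc]
      congr 1
      unfold pvJoin
      rw [List.range_succ, List.map_append, List.flatten_append]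
      simp only [List.map_cons, List.map_nil, List.flatten_cons, List.flatten_nil,
        List.append_nil, htoNat]
      congr 1
      by_cases hc : K + 1 ≤ t
      · rw [if_pos (show (K+1) ≤ t ∧ t - (K+1) < (pvIter s (K+1) xs).length by
            refine ⟨hc, ?_⟩; rw [hlen]; omega), if_pos hc]
      · rw [if_neg (show ¬((K+1) ≤ t ∧ t - (K+1) < (pvIter s (K+1) xs).length) by omega),
            if_neg hc]

-- the B window as produced by the slices -------------------------------------

theorem sliceB_eq_winT (s m t : Nat) (mo : Int) (xs : List (List Int))
    (hmo : mo = (m : Int)) (hmt : m ≤ t) (htn : t < xs.length) :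
    (PySem.List.slice xs (some ((t : Int) - mo)) (some ((t : Int) + 1))).map
        (fun r => PySem.List.slice r none (some (s : Int))) =
      (List.range (m+1)).map (fun i => (xs.getD (t-m+i) []).take s) := by
  have h1 : (t : Int) - mo = ((t - m : Nat) : Int) := by omega
  have h2 : (t : Int) + 1 = ((t + 1 : Nat) : Int) := by omega
  rw [h1, h2, PySem.List.slice_natCast]
  have h3 : t + 1 - (t - m) = m + 1 := by omega
  rw [h3]
  have h4 : (xs.drop (t-m)).take (m+1) =
      (List.range (m+1)).map (fun i => xs.getD (t-m+i) []) := by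
    apply List.ext_getElem
    · simp; omega
    · intro i hi1 hi2
      simp only [List.getElem_take, List.getElem_drop, List.getElem_map, List.getElem_range]
      have : t - m + i < xs.length := by simp at hi1; omega
      rw [List.getD_eq_getElem?_getD, List.getElem?_eq_getElem this]
      rfl
  rw [h4, List.map_map]
  refine List.map_congr_left (fun i _ => ?_)
  simp [PySem.List.slice_to_natCast]

-- the two row formulas ---------------------------------------------------------

theorem pvRowB_of_ge (s : Nat) (mo : Int) (xs : List (List Int)) (t : Nat)
    (h1 : 1 ≤ mo) (h2 : mo ≤ (t:Int)) :
    pvRowB s mo xs t =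
      xs.getD t [] ++ pvPieces s (PySem.List.pyRange 1 (mo+1) 1).length
        ((PySem.List.slice xs (some ((t : Int) - mo)) (some ((t : Int) + 1))).map
          (fun r => PySem.List.slice r none (some (s : Int)))) := by
  show (if 1 ≤ mo ∧ mo ≤ (t:Int) then
        ((PySem.List.pyRange 1 (mo + 1) 1).foldl
          (fun (st : List Int × List (List Int)) _k =>
            let lvl := pvLevelStep s st.2
            (st.1 ++ lvl.getD (lvl.length - 1) [], lvl))
          (xs.getD t [],
           (PySem.List.slice xs (some ((t : Int) - mo)) (some ((t : Int) + 1))).map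
             (fun r => PySem.List.slice r none (some (s : Int))))).1
      else xs.getD t []) = _
  rw [if_pos ⟨h1, h2⟩, foldB_eq_pieces]

theorem pieces_winT (s m t : Nat) (xs : List (List Int)) (hm1 : 1 ≤ m) (hmt : m ≤ t)
    (htn : t < xs.length) :
    pvPieces s m ((List.range (m+1)).map (fun i => (xs.getD (t-m+i) []).take s)) =
      ((List.range m).map (fun k0 => (pvIter s (k0+1) xs).getD (t-(k0+1)) [])).flatten := by
  obtain ⟨r, rfl⟩ : ∃ r, m = r + 1 := ⟨m - 1, by omega⟩
  show ((pvLevelStep s ((List.range (r+1+1)).map (fun i => (xs.getD (t-(r+1)+i) []).take s))).getD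
          ((pvLevelStep s ((List.range (r+1+1)).map (fun i => (xs.getD (t-(r+1)+i) []).take s))).length - 1) []) ++
        pvPieces s r (pvLevelStep s ((List.range (r+1+1)).map (fun i => (xs.getD (t-(r+1)+i) []).take s))) = _
  rw [levelStep_eq_derivStep, derivStep_winT s (t-(r+1)) (r+1) xs (by omega)]
  rw [length_pvWin, Nat.add_sub_cancel, getD_pvWin _ _ _ _ (by omega)]
  rw [pieces_pvWin s r (t-(r+1)) (pvDerivStep s xs) (by rw [length_derivStep]; omega)]
  rw [flatten_map_range_succ]
  have hhead : (pvDerivStep s xs).getD (t-(r+1)+r) [] = (pvIter s (0+1) xs).getD (t-(0+1)) [] := by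
    have h : t-(r+1)+r = t-1 := by omega
    rw [h]; simp [pvIter]
  have htail :
      ((List.range r).map
        (fun k0 => (pvIter s (k0+1) (pvDerivStep s xs)).getD (t-(r+1)+r-(k0+1)) [])).flatten =
      ((List.range r).map (fun k0 => (pvIter s (k0+1+1) xs).getD (t-(k0+1+1)) [])).flatten := by
    refine congrArg _ (List.map_congr_left (fun k0 hk0 => ?_))
    have hk0' : k0 < r := List.mem_range.mp hk0
    rw [pvIter_comm]
    have h : t-(r+1)+r-(k0+1) = t-(k0+1+1) := by omega
    rw [h]
  exact congrArg₂ (· ++ ·) hhead htail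

theorem pvJoin_of_ge (s : Nat) (xs : List (List Int)) (m t : Nat) (hmt : m ≤ t) :
    pvJoin s xs m t =
      ((List.range m).map (fun k0 => (pvIter s (k0+1) xs).getD (t-(k0+1)) [])).flatten := by
  unfold pvJoin
  refine congrArg _ (List.map_congr_left (fun k0 hk0 => ?_))
  rw [if_pos (by have := List.mem_range.mp hk0; omega)]

-- putting one series together -------------------------------------------------

theorem main_series : ∀ (s : Nat) (mo : Int) (xs : List (List Int)),
    pvSeriesA s mo xs =
      PySem.List.slice ((List.range xs.length).map (pvRowB s mo xs)) (some mo) none := by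
  intro s mo xs
  by_cases hmo : 1 ≤ mo
  · -- differencing runs: compare the dropped tails row by row
    have hmoe : mo = (mo.toNat : Int) := by omega
    set n := xs.length with hn
    set m := mo.toNat with hm
    have hm1 : 1 ≤ m := by omega
    have hrange : PySem.List.pyRange 1 (mo+1) 1 =
        (List.range m).map (fun k : Nat => (1:Int) + k) := by
      rw [PySem.List.pyRange_one, show ((mo+1)-1).toNat = m from by omega]
    have hlenks : (PySem.List.pyRange 1 (mo+1) 1).length = m := by
      rw [PySem.List.length_pyRange_one]; omega
    show PySem.List.slice
        (((PySem.List.pyRange 1 (mo+1) 1).foldl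
          (fun (st : List (List Int) × List (List Int)) order =>
            let d := pvDerivStep s st.2
            (pvExtendLoop order d st.1, d)) (xs, xs)).1) (some mo) none = _
    rw [hrange, foldA_inv]
    rw [PySem.List.slice_from _ (by omega : (0:Int) ≤ mo), PySem.List.slice_from _ (by omega : (0:Int) ≤ mo), ← hm]
    rw [drop_map_range, drop_map_range]
    refine List.map_congr_left (fun i hi => ?_)
    have hi' : i < n - m := List.mem_range.mp hi
    have hmt : m ≤ m + i := by omega
    have htn : m + i < n := by omega
    rw [pvRowB_of_ge s mo xs (m+i) hmo (by omega), hlenks,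
        sliceB_eq_winT s m (m+i) mo xs hmoe hmt htn,
        pieces_winT s m (m+i) xs hm1 hmt htn,
        pvJoin_of_ge s xs m (m+i) hmt]
  · -- max_order ≤ 0: no differencing on either side; both slice the original rows
    unfold pvSeriesA
    rw [PySem.List.pyRange_one_eq_nil (by omega)]
    simp only [List.foldl_nil]
    congr 1
    have : ∀ t ∈ List.range xs.length, pvRowB s mo xs t = xs.getD t [] := by
      intro t _
      unfold pvRowB
      rw [if_neg (by omega)]
    rw [List.map_congr_left this, map_getD_range_self]

-- ===== VERDICT (by name: the statement is the Claim_ definition above) =====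
theorem transform_spec : Claim_equal_transform := by
  intro ser mo _ _
  unfold Spec_transform transform transform_alt
  rw [PySem.List.foldl_append_singleton_eq_map]
  exact List.map_congr_left (fun xs _ => main_series _ mo xs)
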